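-- pv_equiv track=rewrite | github.com/bkiranid4u/python | datascience/numpy/untitled0.py | getMinimumDeflatedDiscCount
-- ===== SOURCE A (Python) =====
-- from typing import List
--
-- def getMinimumDeflatedDiscCount(N: int, R: List[int]) -> int:
--   # Write your code here
--   total_discs_inflated = 0
--   for i in range(1, N+1):
--       inflatable_disc = R[i-1]
--
--       if inflatable_disc > i:
--           total_discs_inflated = total_discs_inflated + 1
--       elif inflatable_disc < i:
--           return -1
--
--       if inflatable_disc > i and i ==N:
--
--           total_discs_inflated = total_discs_inflated -1
--
--   return total_discs_inflated;
-- ===== SOURCE B (Python) =====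
-- from typing import List
--
-- def getMinimumDeflatedDiscCount(N: int, R: List[int]) -> int:
--     # validity pass: any disc that must shrink -> -1 (scans left to right like A)
--     if any(R[i - 1] < i for i in range(1, N + 1)):
--         return -1
--     # counting pass: the last disc (i == N) never contributes in A, so stop at N-1
--     return sum(1 for i in range(1, N) if R[i - 1] > i)
-- ===== Notes on version B (the rewrite author's own statement) =====
-- stated objective: simpler
-- what changed: Replaces A's single fused loop (running counter, inline -1 return, increment-then-decrement fix for the last disc) by two separate linear passes: an any() validity scan over 1..N, then a sum() comprehension counting R[i-1] > i over 1..N-1.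
import Mathlib
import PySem

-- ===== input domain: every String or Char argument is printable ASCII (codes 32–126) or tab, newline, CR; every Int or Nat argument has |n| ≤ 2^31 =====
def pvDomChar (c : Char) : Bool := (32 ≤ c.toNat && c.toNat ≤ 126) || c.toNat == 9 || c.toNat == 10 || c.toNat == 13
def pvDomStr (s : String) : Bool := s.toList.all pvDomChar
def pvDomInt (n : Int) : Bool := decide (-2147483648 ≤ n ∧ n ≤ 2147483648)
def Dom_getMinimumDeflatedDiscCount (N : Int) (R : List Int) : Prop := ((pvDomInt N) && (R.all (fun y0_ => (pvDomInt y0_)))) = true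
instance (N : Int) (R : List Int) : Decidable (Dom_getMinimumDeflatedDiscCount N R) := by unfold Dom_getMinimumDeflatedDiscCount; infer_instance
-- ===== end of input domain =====

-- B replaces A's single fused loop by two separate passes (a validity scan, then a count); simpler decomposition, same cost.

-- ===== PORT A =====
-- A's fused for-loop over i in range(1, N+1), iterated lazily as Python does;
-- the Nat argument is the number of remaining iterations (range length); none = IndexError at R[i-1].
def pvLoopA (N : Int) (R : List Int) : Nat → Int → Int → Option Int
  | 0, _, acc => some acc
  | k + 1, i, acc =>
    match PySem.List.pyGet? R (i - 1) with
    | none => none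
    | some d =>
      if d > i then
        let acc1 := acc + 1
        let acc2 := if d > i ∧ i = N then acc1 - 1 else acc1
        pvLoopA N R k (i + 1) acc2
      else if d < i then some (-1)
      else pvLoopA N R k (i + 1) acc

def getMinimumDeflatedDiscCount (N : Int) (R : List Int) : Int :=
  (pvLoopA N R N.toNat 1 0).getD 0

-- ===== PORT B =====
-- B's first pass: any(R[i-1] < i for i in range(1, N+1)), lazy like the generator; none = IndexError.
def pvAnyShrink (R : List Int) : Nat → Int → Option Bool
  | 0, _ => some false
  | k + 1, i =>
    match PySem.List.pyGet? R (i - 1) with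
    | none => none
    | some d => if d < i then some true else pvAnyShrink R k (i + 1)

-- B's second pass: sum(1 for i in range(1, N) if R[i-1] > i); none = IndexError.
def pvCountB (R : List Int) : Nat → Int → Int → Option Int
  | 0, _, acc => some acc
  | k + 1, i, acc =>
    match PySem.List.pyGet? R (i - 1) with
    | none => none
    | some d => pvCountB R k (i + 1) (if d > i then acc + 1 else acc)

def getMinimumDeflatedDiscCount_alt (N : Int) (R : List Int) : Int :=
  match pvAnyShrink R N.toNat 1 with
  | none => 0
  | some true => -1
  | some false => (pvCountB R (N - 1).toNat 1 0).getD 0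

-- ===== PRECONDITION & SPEC =====
-- Pre_ excludes exactly the inputs where A raises IndexError: N exceeds len(R) and no prefix disc forces -1.
def Pre_getMinimumDeflatedDiscCount (N : Int) (R : List Int) : Prop :=
  N ≤ (R.length : Int) ∨ ∃ i ∈ List.range R.length, R.getD i 0 < (i : Int) + 1
instance (N : Int) (R : List Int) : Decidable (Pre_getMinimumDeflatedDiscCount N R) := by
  unfold Pre_getMinimumDeflatedDiscCount; infer_instance

def pvWitness_getMinimumDeflatedDiscCount : Int × List Int := (3, [2, 3, 4])

def Spec_getMinimumDeflatedDiscCount (N : Int) (R : List Int) (out : Int) : Prop := out = getMinimumDeflatedDiscCount_alt N R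
instance (N : Int) (R : List Int) (out : Int) : Decidable (Spec_getMinimumDeflatedDiscCount N R out) := by unfold Spec_getMinimumDeflatedDiscCount; infer_instance

-- ===== CLAIM (what is proved, stated in full; the proofs are below) =====
def Claim_equal_getMinimumDeflatedDiscCount : Prop := ∀ (N : Int) (R : List Int), Dom_getMinimumDeflatedDiscCount N R → Pre_getMinimumDeflatedDiscCount N R → Spec_getMinimumDeflatedDiscCount N R (getMinimumDeflatedDiscCount N R)

-- ===== LEMMAS AND PROOFS =====

-- One fused pass of A over an index list ending in N equals B's two passes over it.
-- One fuelled pass of A from index i equals B's two passes from i (fuel k ≥ 1 reaching exactly index N).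
theorem pvSplit (N : Int) (R : List Int) : ∀ (k : Nat) (i acc : Int), i + k = N + 1 → 1 ≤ k →
    pvLoopA N R k i acc =
      match pvAnyShrink R k i with
      | none => none
      | some true => some (-1)
      | some false => pvCountB R (k - 1) i acc := by
  intro k
  induction k with
  | zero => intro i acc _ hk; exact absurd hk (by omega)
  | succ k ih =>
    intro i acc hik _
    simp only [pvLoopA, pvAnyShrink, Nat.add_sub_cancel]
    cases h : PySem.List.pyGet? R (i - 1) with
    | none => rfl
    | some d =>
      dsimp only
      cases k with
      | zero =>
        have hiN : i = N := by omega
        by_cases hlt : d < i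
        · have hngt : ¬ d > i := by omega
          simp [hlt, hngt]
        · by_cases hgt : d > i
          · rw [if_pos hgt, if_pos ⟨hgt, hiN⟩, if_neg hlt]
            simp [pvLoopA, pvAnyShrink, pvCountB]
          · rw [if_neg hgt, if_neg hlt]
            simp [pvLoopA, pvAnyShrink, pvCountB, hlt]
      | succ k' =>
        have hiN : i ≠ N := by omega
        by_cases hlt : d < i
        · have hngt : ¬ d > i := by omega
          simp [hlt, hngt]
        · by_cases hgt : d > i
          · rw [if_pos hgt, if_neg (fun hc : d > i ∧ i = N => hiN hc.2), if_neg hlt]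
            rw [ih (i + 1) (acc + 1) (by omega) (by omega)]
            conv_rhs => rw [pvCountB]
            rw [h]
            simp [hgt]
          · rw [if_neg hgt, if_neg hlt]
            rw [ih (i + 1) acc (by omega) (by omega)]
            conv_rhs => rw [pvCountB]
            rw [h]
            simp [hgt, hlt]

-- ===== VERDICT (by name: the statement is the Claim_ definition above) =====
theorem getMinimumDeflatedDiscCount_spec : Claim_equal_getMinimumDeflatedDiscCount := by
  unfold Claim_equal_getMinimumDeflatedDiscCount
  intro N R _ _
  unfold Spec_getMinimumDeflatedDiscCount getMinimumDeflatedDiscCount getMinimumDeflatedDiscCount_alt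
  by_cases hN : 1 ≤ N
  · have hk : (1 : Int) + N.toNat = N + 1 := by omega
    have hk1 : 1 ≤ N.toNat := by omega
    rw [pvSplit N R N.toNat 1 0 hk hk1]
    have hN1 : N.toNat - 1 = (N - 1).toNat := by omega
    rw [hN1]
    cases hx : pvAnyShrink R N.toNat 1 with
    | none => rfl
    | some b => cases b <;> rfl
  · have h0 : N.toNat = 0 := by omega
    have h1 : (N - 1).toNat = 0 := by omega
    rw [h0, h1]
    simp [pvLoopA, pvAnyShrink, pvCountB]
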